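-- pv_equiv track=rewrite | github.com/paquiteau/snake-fmri | docs/_ext/scenario.py | _split_header_body
-- ===== SOURCE A (Python) =====
-- def _split_header_body(filecontent: list[str]) -> tuple[str, str]:
--     """Split a file content into header and body."""
--     header = []
--     body = []
--     in_header = True
--     for line in filecontent:
--         if line.startswith("#") and in_header:
--             header.append(line.strip("# "))
--         else:
--             in_header = False
--             body.append(line)
--     return "\n".join(header), "".join(body)
-- ===== SOURCE B (Python) =====
-- def _split_header_body(filecontent: list[str]) -> tuple[str, str]:
--     """Split a file content into header and body."""
--     h, body = _rec(filecontent)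
--     return ("" if h is None else h), body
--
--
-- def _rec(lines: list[str]) -> tuple:
--     """Recursively split: returns (joined header or None, joined body)."""
--     if not lines or not lines[0].startswith("#"):
--         return None, "".join(lines)
--     h, body = _rec(lines[1:])
--     s = lines[0].strip("# ")
--     return (s if h is None else s + "\n" + h), body
-- ===== Notes on version B (the rewrite author's own statement) =====
-- stated objective: alternative
-- what changed: Replaces A's single iterative pass with a flag and two list accumulators by a structural recursion that builds both joined strings directly back-to-front (Optional header string, no intermediate lists, no join at the end for the header).
import Mathlib
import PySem

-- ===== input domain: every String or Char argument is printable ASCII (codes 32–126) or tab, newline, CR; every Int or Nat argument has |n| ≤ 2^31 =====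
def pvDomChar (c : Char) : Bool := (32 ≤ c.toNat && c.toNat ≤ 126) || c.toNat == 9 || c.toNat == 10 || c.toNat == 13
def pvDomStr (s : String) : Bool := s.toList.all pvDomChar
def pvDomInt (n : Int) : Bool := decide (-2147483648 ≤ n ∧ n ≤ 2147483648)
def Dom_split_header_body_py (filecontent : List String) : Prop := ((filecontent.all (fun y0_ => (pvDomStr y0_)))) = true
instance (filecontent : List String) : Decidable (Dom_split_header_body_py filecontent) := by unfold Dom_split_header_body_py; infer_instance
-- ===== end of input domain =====

-- B is a structural recursion building the two joined strings directly (Optional header),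
-- instead of A's iterative flagged pass over list accumulators; return values proved equal.

-- ===== PORT A =====
-- fold state: (header, body, in_header)
def split_header_body_py (filecontent : List String) : String × String :=
  let st := filecontent.foldl
    (fun (st : List String × List String × Bool) line =>
      if PySem.Str.startswith line "#" && st.2.2 then
        (st.1 ++ [PySem.Str.stripChars line "# "], st.2.1, st.2.2)
      else
        (st.1, st.2.1 ++ [line], false))
    ([], [], true)
  (PySem.Str.join "\n" st.1, PySem.Str.join "" st.2.1)

-- ===== PORT B =====
-- Source B's _rec: structural recursion returning (Optional joined header, joined body)
def pvRec : List String → Option String × String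
  | [] => (none, PySem.Str.join "" ([] : List String))
  | line :: rest =>
    if PySem.Str.startswith line "#" then
      let r := pvRec rest
      let s := PySem.Str.stripChars line "# "
      ((match r.1 with
        | none => some s
        | some h => some (s ++ "\n" ++ h)), r.2)
    else (none, PySem.Str.join "" (line :: rest))

def split_header_body_py_alt (filecontent : List String) : String × String :=
  let r := pvRec filecontent
  ((match r.1 with | none => "" | some h => h), r.2)

-- ===== PRECONDITION & SPEC =====
def Spec_split_header_body_py (filecontent : List String) (out : String × String) : Prop := out = split_header_body_py_alt filecontent
instance (filecontent : List String) (out : String × String) : Decidable (Spec_split_header_body_py filecontent out) := by unfold Spec_split_header_body_py; infer_instance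

-- ===== CLAIM (what is proved, stated in full; the proofs are below) =====
def Claim_equal_split_header_body_py : Prop := ∀ (filecontent : List String), Dom_split_header_body_py filecontent → Spec_split_header_body_py filecontent (split_header_body_py filecontent)

-- ===== LEMMAS AND PROOFS =====

-- once in_header is false, A's loop only appends lines to body
theorem pv_fold_false (xs : List String) (h b : List String) :
    xs.foldl
      (fun (st : List String × List String × Bool) line =>
        if PySem.Str.startswith line "#" && st.2.2 then
          (st.1 ++ [PySem.Str.stripChars line "# "], st.2.1, st.2.2)
        else
          (st.1, st.2.1 ++ [line], false))
      (h, b, false) = (h, b ++ xs, false) := by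
  induction xs generalizing b with
  | nil => simp
  | cons x xs ih =>
    simp only [List.foldl_cons, Bool.and_false, Bool.false_eq_true, if_false]
    rw [ih]
    simp

-- A's loop from the header phase: takeWhile/dropWhile characterisation
theorem pv_fold_true (xs : List String) (h b : List String) :
    (xs.foldl
      (fun (st : List String × List String × Bool) line =>
        if PySem.Str.startswith line "#" && st.2.2 then
          (st.1 ++ [PySem.Str.stripChars line "# "], st.2.1, st.2.2)
        else
          (st.1, st.2.1 ++ [line], false))
      (h, b, true)) =
    (h ++ (xs.takeWhile (fun l => PySem.Str.startswith l "#")).map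
        (fun line => PySem.Str.stripChars line "# "),
     b ++ xs.dropWhile (fun l => PySem.Str.startswith l "#"),
     xs.all (fun l => PySem.Str.startswith l "#")) := by
  induction xs generalizing h b with
  | nil => simp
  | cons x xs ih =>
    simp only [List.foldl_cons, Bool.and_true]
    by_cases hx : PySem.Str.startswith x "#" = true
    · rw [if_pos hx, ih]
      simp at hx
      simp [hx]
    · rw [if_neg hx, pv_fold_false]
      simp at hx
      simp [hx]

-- "\n".join over a nonempty list, unrolled one element
theorem pv_join_cons (s : String) (l : List String) (hl : l ≠ []) :
    PySem.Str.join "\n" (s :: l) = s ++ "\n" ++ PySem.Str.join "\n" l := by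
  cases l with
  | nil => simp at hl
  | cons b t =>
    simp [PySem.Str.join, PySem.Chars.join_cons_cons, ← String.toList_inj, String.toList_ofList]

theorem pv_join_singleton (s : String) : PySem.Str.join "\n" [s] = s := by
  simp [PySem.Str.join, PySem.Chars.join_singleton]

theorem pv_join_empty : PySem.Str.join "\n" ([] : List String) = "" := by
  simp [PySem.Str.join]

-- B's recursion computes exactly the takeWhile/dropWhile characterisation
theorem pv_rec_eq (xs : List String) :
    pvRec xs =
      ((match (xs.takeWhile (fun l => PySem.Str.startswith l "#")).map
          (fun line => PySem.Str.stripChars line "# ") with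
        | [] => none
        | hl => some (PySem.Str.join "\n" hl)),
       PySem.Str.join "" (xs.dropWhile (fun l => PySem.Str.startswith l "#"))) := by
  induction xs with
  | nil => rfl
  | cons x xs ih =>
    by_cases hx : PySem.Str.startswith x "#" = true
    · simp only [pvRec, hx, if_true, ih, List.takeWhile_cons, List.dropWhile_cons]
      simp only [List.map_cons]
      cases h : (xs.takeWhile (fun l => PySem.Str.startswith l "#")).map
          (fun line => PySem.Str.stripChars line "# ") with
      | nil => simp [pv_join_singleton]
      | cons a t => simp [pv_join_cons _ _ (List.cons_ne_nil a t)]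
    · simp only [pvRec, hx, List.takeWhile_cons, List.dropWhile_cons]
      simp

-- ===== VERDICT (by name: the statement is the Claim_ definition above) =====
theorem split_header_body_py_spec : Claim_equal_split_header_body_py := by
  intro filecontent _
  show _ = _
  simp only [split_header_body_py, split_header_body_py_alt, pv_fold_true, pv_rec_eq]
  cases h : (filecontent.takeWhile (fun l => PySem.Str.startswith l "#")).map
      (fun line => PySem.Str.stripChars line "# ") with
  | nil => simp [pv_join_empty]
  | cons a l => simp
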